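-- pv_equiv track=rewrite | github.com/Eshwar-Potnuru/Tashiro_Receipt_OCR | app/extractors/field_extractors.py | _is_valid_invoice_number
-- ===== SOURCE A (Python) =====
-- def _is_valid_invoice_number(candidate: str) -> bool:
--     """Validate if a string looks like a valid invoice number."""
--     # Remove hyphens for validation
--     clean_candidate = candidate.replace('-', '')
--
--     # Must contain at least one digit
--     if not any(char.isdigit() for char in clean_candidate):
--         return False
--
--     # Length checks - be more restrictive
--     if len(clean_candidate) < 4:
--         return False  # Too short for invoice numbers
--     if len(clean_candidate) > 15:
--         return False  # Too long for invoice number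
--
--     # Avoid obvious patterns that aren't invoice numbers
--     # Like percentages, times, etc.
--     if '%' in candidate or ':' in candidate or '/' in candidate:
--         return False
--
--     # Avoid single letters followed by short digit sequences (likely item codes)
--     if len(clean_candidate) <= 4 and clean_candidate[0].isalpha() and clean_candidate[1:].isdigit():
--         return False  # Patterns like "e445", "a123" are likely item codes
--
--     # Avoid very short numbers unless they have multiple letters
--     if len(clean_candidate) <= 3 and sum(1 for c in clean_candidate if c.isalpha()) < 2:
--         return False
--
--     # For Japanese receipts, prefer patterns that look like proper invoice numbers
--     # T + digits (registration numbers), or longer alphanumeric mixes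
--     if len(clean_candidate) >= 6 or (clean_candidate[0].isalpha() and len(clean_candidate) >= 5):
--         return True
--
--     # For shorter patterns, require more structure
--     if len(clean_candidate) >= 4 and any(char.isalpha() for char in clean_candidate):
--         return True
--
--     return False
-- ===== SOURCE B (Python) =====
-- def _is_valid_invoice_number(candidate: str) -> bool:
--     """Streaming validator: one pass over the original string (no cleaned copy),
--     then a single minimized boolean decision rule."""
--     n = 0
--     has_digit = False
--     has_alpha = False
--     first_alpha = False
--     tail_digits = True
--     bad_punct = False
--     for c in candidate:
--         if c in '%:/':
--             bad_punct = True
--         if c == '-':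
--             continue
--         if n == 0:
--             first_alpha = c.isalpha()
--         elif not c.isdigit():
--             tail_digits = False
--         if c.isdigit():
--             has_digit = True
--         elif c.isalpha():
--             has_alpha = True
--         n += 1
--     return (has_digit and not bad_punct and 4 <= n <= 15
--             and (n >= 6 or has_alpha)
--             and not (n == 4 and first_alpha and tail_digits))
-- ===== Notes on version B (the rewrite author's own statement) =====
-- stated objective: alternative
-- what changed: A builds a hyphen-free copy and runs staged passes over it (replace, two any() scans, a sum(), slicing for the item-code test) through a seven-branch cascade; B never materialises the cleaned string: it streams once over the original candidate accumulating six features (count, digit/alpha flags, first-char class, tail-all-digits, punctuation flag) and decides with a single minimized boolean rule in which A's dead len<=3 branch and subsumed first-alpha tier disappear.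
import Mathlib
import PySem

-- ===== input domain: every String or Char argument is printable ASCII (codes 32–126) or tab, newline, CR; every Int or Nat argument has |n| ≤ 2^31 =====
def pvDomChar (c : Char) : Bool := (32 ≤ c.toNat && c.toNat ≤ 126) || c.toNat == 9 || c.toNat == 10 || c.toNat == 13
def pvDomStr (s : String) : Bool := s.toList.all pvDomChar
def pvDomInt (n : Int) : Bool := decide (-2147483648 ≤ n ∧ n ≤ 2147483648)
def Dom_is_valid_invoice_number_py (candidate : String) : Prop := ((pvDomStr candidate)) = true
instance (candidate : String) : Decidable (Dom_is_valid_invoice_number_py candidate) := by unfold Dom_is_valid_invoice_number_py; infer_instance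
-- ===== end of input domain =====

-- B replaces A's staged passes over a cleaned copy (replace, two any(), a sum(), slicing)
-- by one streaming pass over the original string collecting features, followed by a single
-- minimized boolean decision rule (objective: simpler).

-- ===== PORT A =====
-- clean_candidate[0].isalpha(); Python would raise on empty, but every use is guarded by len ≥ 4,
-- so the `none` arm of pyGet? is unreachable; returning false there is exact on the reachable inputs.
def pvHeadAlpha (cs : List Char) : Bool :=
  match PySem.List.pyGet? cs 0 with
  | some c => PySem.Chars.isalpha c
  | none => false

def is_valid_invoice_number_py (candidate : String) : Bool :=
  let clean := PySem.Chars.replace candidate.toList ['-'] []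
  if !(clean.any PySem.Chars.isdigit) then false
  else if clean.length < 4 then false
  else if clean.length > 15 then false
  else if PySem.Chars.isIn ['%'] candidate.toList || PySem.Chars.isIn [':'] candidate.toList
       || PySem.Chars.isIn ['/'] candidate.toList then false
  else if decide (clean.length ≤ 4) && pvHeadAlpha clean
       && PySem.Chars.strIsdigit (PySem.List.slice clean (some 1) none) then false
  else if decide (clean.length ≤ 3)
       && decide (clean.foldl (fun a c => if PySem.Chars.isalpha c then a + 1 else a) 0 < 2) then false
  else if decide (clean.length ≥ 6) || (pvHeadAlpha clean && decide (clean.length ≥ 5)) then true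
  else if decide (clean.length ≥ 4) && clean.any PySem.Chars.isalpha then true
  else false

-- ===== PORT B =====
-- the loop state of Source B: n, has_digit, has_alpha, first_alpha, tail_digits, bad_punct
structure PvSt where
  n : Nat
  hd : Bool
  ha : Bool
  fa : Bool
  td : Bool
  bad : Bool
  deriving DecidableEq, Repr

-- one iteration of Source B's for-loop (the `continue` is the '-' branch)
def pvStep (s : PvSt) (c : Char) : PvSt :=
  let bad := s.bad || (c == '%' || c == ':' || c == '/')
  if c == '-' then { s with bad := bad }
  else
    { n := s.n + 1,
      hd := s.hd || PySem.Chars.isdigit c,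
      ha := if PySem.Chars.isdigit c then s.ha else s.ha || PySem.Chars.isalpha c,
      fa := if s.n == 0 then PySem.Chars.isalpha c else s.fa,
      td := if s.n == 0 then s.td else s.td && PySem.Chars.isdigit c,
      bad := bad }

def is_valid_invoice_number_py_alt (candidate : String) : Bool :=
  let s := candidate.toList.foldl pvStep ⟨0, false, false, false, true, false⟩
  s.hd && !s.bad && decide (4 ≤ s.n) && decide (s.n ≤ 15)
    && (decide (6 ≤ s.n) || s.ha)
    && !(s.n == 4 && s.fa && s.td)

-- ===== PRECONDITION & SPEC =====
def Spec_is_valid_invoice_number_py (candidate : String) (out : Bool) : Prop := out = is_valid_invoice_number_py_alt candidate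
instance (candidate : String) (out : Bool) : Decidable (Spec_is_valid_invoice_number_py candidate out) := by unfold Spec_is_valid_invoice_number_py; infer_instance

-- ===== CLAIM (what is proved, stated in full; the proofs are below) =====
def Claim_equal_is_valid_invoice_number_py : Prop := ∀ (candidate : String), Dom_is_valid_invoice_number_py candidate → Spec_is_valid_invoice_number_py candidate (is_valid_invoice_number_py candidate)

-- ===== LEMMAS AND PROOFS =====

-- the state B's loop has computed after reading cs, in closed form
def pvF (cs : List Char) : PvSt :=
  let m := cs.filter (fun c => !(c == '-'))
  ⟨m.length,
   m.any PySem.Chars.isdigit,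
   m.any PySem.Chars.isalpha,
   (match m.head? with | some c => PySem.Chars.isalpha c | none => false),
   m.tail.all PySem.Chars.isdigit,
   cs.any (fun c => c == '%' || c == ':' || c == '/')⟩

-- a letter is never a digit
theorem pv_digit_alpha (c : Char) :
    (!PySem.Chars.isdigit c && PySem.Chars.isalpha c) = PySem.Chars.isalpha c := by
  simp only [PySem.Chars.isdigit, PySem.Chars.isalpha, PySem.Chars.isupper, PySem.Chars.islower]
  by_cases h0 : '0' ≤ c <;> by_cases h9 : c ≤ '9' <;> simp [h0, h9]
  exact ⟨fun h => absurd (le_trans h h9) (by decide),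
         fun h => absurd (le_trans h h9) (by decide)⟩

theorem pv_alpha_of_digit (c : Char) (h : PySem.Chars.isdigit c = true) :
    PySem.Chars.isalpha c = false := by
  have := pv_digit_alpha c; rw [h] at this; simpa using this.symm

theorem pv_step_F (p : List Char) (c : Char) : pvStep (pvF p) c = pvF (p ++ [c]) := by
  by_cases hc : c = '-'
  · subst hc
    simp [pvStep, pvF, List.filter_append]
  · have hf : (List.filter (fun c => !(c == '-')) (p ++ [c]))
        = List.filter (fun c => !(c == '-')) p ++ [c] := by
      simp [List.filter_append, hc]
    unfold pvStep pvF
    simp only [hf, if_neg (by simp [hc] : ¬ ((c == '-') = true))]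
    cases hm : List.filter (fun c => !(c == '-')) p with
    | nil =>
      simp only [List.nil_append, List.length_nil, List.any_nil, List.any_cons,
        List.any_append, List.head?_nil, List.head?_cons, List.tail_cons, List.all_nil,
        PvSt.mk.injEq]
      refine ⟨rfl, by simp, ?_, by simp, rfl, by simp⟩
      cases hd : PySem.Chars.isdigit c
      · simp
      · simp [pv_alpha_of_digit c hd]
    | cons x xs =>
      simp only [List.length_cons, List.cons_append, List.any_cons, List.any_append,
        List.any_nil, List.head?_cons, List.tail_cons, List.all_append, List.all_cons,
        List.all_nil, PvSt.mk.injEq, List.length_append, List.length_nil]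
      refine ⟨by simp, ?_, ?_, by simp, by simp, by simp⟩
      · cases PySem.Chars.isdigit c <;> cases PySem.Chars.isdigit x <;>
          cases xs.any PySem.Chars.isdigit <;> rfl
      · cases hd : PySem.Chars.isdigit c
        · cases PySem.Chars.isalpha c <;> cases PySem.Chars.isalpha x <;>
            cases xs.any PySem.Chars.isalpha <;> rfl
        · simp only [pv_alpha_of_digit c hd]
          cases PySem.Chars.isalpha x <;> cases xs.any PySem.Chars.isalpha <;> rfl

theorem pv_foldl_F (cs p : List Char) :
    cs.foldl pvStep (pvF p) = pvF (p ++ cs) := by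
  induction cs generalizing p with
  | nil => simp
  | cons c cs ih =>
    rw [List.foldl_cons, pv_step_F, ih]
    simp

theorem pv_fold_eq_F (cs : List Char) :
    cs.foldl pvStep ⟨0, false, false, false, true, false⟩ = pvF cs := by
  have h0 : (⟨0, false, false, false, true, false⟩ : PvSt) = pvF [] := by
    simp [pvF]
  rw [h0, pv_foldl_F]
  simp

-- Python's `replace(s, '-', '')` is a filter
theorem pv_replace_go (l acc : List Char) (fuel : Nat) (h : l.length ≤ fuel) :
    PySem.Chars.replace.go ['-'] [] fuel l acc
      = acc.reverse ++ l.filter (fun c => !(c == '-')) := by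
  induction fuel generalizing l acc with
  | zero =>
    have : l = [] := List.length_eq_zero_iff.mp (Nat.le_zero.mp h)
    subst this; simp [PySem.Chars.replace.go]
  | succ fuel ih =>
    cases l with
    | nil => simp [PySem.Chars.replace.go]
    | cons c t =>
      simp only [List.length_cons, Nat.succ_le_succ_iff] at h
      by_cases hc : c = '-'
      · subst hc
        rw [show PySem.Chars.replace.go ['-'] [] (fuel+1) ('-' :: t) acc
            = PySem.Chars.replace.go ['-'] [] fuel t acc from by
          simp [PySem.Chars.replace.go, List.isPrefixOf]]
        rw [ih t acc h]; simp
      · rw [show PySem.Chars.replace.go ['-'] [] (fuel+1) (c :: t) acc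
            = PySem.Chars.replace.go ['-'] [] fuel t (c :: acc) from by
          simp [PySem.Chars.replace.go, List.isPrefixOf, Ne.symm hc]]
        rw [ih t (c :: acc) h]; simp [hc]

theorem pv_replace_filter (cs : List Char) :
    PySem.Chars.replace cs ['-'] [] = cs.filter (fun c => !(c == '-')) := by
  rw [show PySem.Chars.replace cs ['-'] [] = PySem.Chars.replace.go ['-'] [] cs.length cs [] from by
        simp [PySem.Chars.replace]]
  rw [pv_replace_go cs [] cs.length le_rfl]; simp

-- sub in s for a single character is a membership scan
theorem pv_isIn_single (x : Char) (s : List Char) :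
    PySem.Chars.isIn [x] s = s.any (· == x) := by
  rw [Bool.eq_iff_iff, PySem.Chars.isIn_iff_infix, List.singleton_infix_iff, List.any_eq_true]
  simp

-- the decision rule as a boolean fact over the features (n, a, q, fa, td)
theorem pv_bool (n : Nat) (a q fa tdA tdB e : Bool)
    (hfa : fa = true → a = true) (htd : n = 4 → tdA = tdB) :
    (if n < 4 then false
     else if n > 15 then false
     else if q then false
     else if decide (n ≤ 4) && fa && tdA then false
     else if decide (n ≤ 3) && e then false
     else if decide (n ≥ 6) || (fa && decide (n ≥ 5)) then true
     else if decide (n ≥ 4) && a then true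
     else false)
    = (!q && decide (4 ≤ n) && decide (n ≤ 15) && (decide (6 ≤ n) || a)
        && !(n == 4 && fa && tdB)) := by
  by_cases h4 : n < 4
  · have : decide (4 ≤ n) = false := by simp; omega
    simp [h4, this]
  · by_cases h15 : n > 15
    · have : decide (n ≤ 15) = false := by simp; omega
      simp [h4, h15, this]
    · cases q with
      | true => simp [h4, h15]
      | false =>
        by_cases h6 : 6 ≤ n
        · have hne4 : (n == 4) = false := by simp; omega
          have : ¬ (n ≤ 4) := by omega
          have h3 : ¬ (n ≤ 3) := by omega
          simp [h4, h15, h6, this, h3, hne4, (by omega : 4 ≤ n), (by omega : n ≤ 15)]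
        · by_cases h5 : n = 5
          · subst h5
            simp only [if_neg h4, if_neg h15, Bool.false_eq_true, if_false,
              show (decide (5 ≤ 4) : Bool) = false from rfl, Bool.false_and,
              show (decide (5 ≤ 3) : Bool) = false from rfl,
              show (decide (5 ≥ 6) : Bool) = false from rfl, Bool.false_or,
              show (decide (5 ≥ 5) : Bool) = true from rfl, Bool.and_true,
              show (decide (4 ≤ 5) : Bool) = true from rfl,
              show (decide (5 ≤ 15) : Bool) = true from rfl,
              show ((5 : Nat) == 4) = false from rfl, Bool.not_false, Bool.true_and]
            cases hf : fa with
            | true => simp [hfa hf]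
            | false =>
              cases a <;> simp
          · have hn4 : n = 4 := by omega
            subst hn4
            rw [htd rfl]
            simp only [if_neg h4, if_neg h15, Bool.false_eq_true, if_false,
              show (decide (4 ≤ 4) : Bool) = true from rfl, Bool.true_and,
              show (decide (4 ≤ 3) : Bool) = false from rfl, Bool.false_and,
              show (decide (4 ≥ 6) : Bool) = false from rfl, Bool.false_or,
              show (decide (4 ≥ 5) : Bool) = false from rfl, Bool.and_false,
              show (decide (4 ≤ 15) : Bool) = true from rfl,
              show ((4 : Nat) == 4) = true from rfl]
            cases fa <;> cases tdB <;> cases a <;> rfl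

-- the core equality: A's cascade over the cleaned list m equals B's rule over the features
theorem pv_core (m : List Char) (q : Bool) :
    (if !(m.any PySem.Chars.isdigit) then false
     else if m.length < 4 then false
     else if m.length > 15 then false
     else if q then false
     else if decide (m.length ≤ 4) && pvHeadAlpha m
          && PySem.Chars.strIsdigit (PySem.List.slice m (some 1) none) then false
     else if decide (m.length ≤ 3)
          && decide (m.foldl (fun a c => if PySem.Chars.isalpha c then a + 1 else a) 0 < 2) then false
     else if decide (m.length ≥ 6) || (pvHeadAlpha m && decide (m.length ≥ 5)) then true
     else if decide (m.length ≥ 4) && m.any PySem.Chars.isalpha then true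
     else false)
    = (m.any PySem.Chars.isdigit && !q && decide (4 ≤ m.length) && decide (m.length ≤ 15)
        && (decide (6 ≤ m.length) || m.any PySem.Chars.isalpha)
        && !(m.length == 4
             && (match m.head? with | some c => PySem.Chars.isalpha c | none => false)
             && m.tail.all PySem.Chars.isdigit)) := by
  cases hd : m.any PySem.Chars.isdigit with
  | false => simp
  | true =>
    cases m with
    | nil => simp at hd
    | cons c rest =>
      rw [PySem.List.slice_from_one]
      have hhd : pvHeadAlpha (c :: rest) = PySem.Chars.isalpha c := by
        simp [pvHeadAlpha, PySem.List.pyGet?, PySem.List.pyIdx?]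
      simp only [hhd, Bool.not_true, Bool.false_eq_true, if_false, Bool.true_and,
        List.head?_cons, List.tail_cons]
      exact pv_bool (c :: rest).length (List.any (c :: rest) PySem.Chars.isalpha) q
        (PySem.Chars.isalpha c) (PySem.Chars.strIsdigit rest) (rest.all PySem.Chars.isdigit)
        (decide ((c :: rest).foldl (fun a c => if PySem.Chars.isalpha c then a + 1 else a) 0 < 2))
        (fun h => by simp [h])
        (fun h => by
          have hrest : rest ≠ [] := by
            intro he; subst he; simp at h
          simp [PySem.Chars.strIsdigit, hrest])
-- ===== VERDICT (by name: the statement is the Claim_ definition above) =====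
theorem is_valid_invoice_number_py_spec : Claim_equal_is_valid_invoice_number_py := by
  intro candidate _
  unfold Spec_is_valid_invoice_number_py is_valid_invoice_number_py is_valid_invoice_number_py_alt
  rw [pv_fold_eq_F, pv_replace_filter]
  have hq : (PySem.Chars.isIn ['%'] candidate.toList || PySem.Chars.isIn [':'] candidate.toList
      || PySem.Chars.isIn ['/'] candidate.toList)
      = candidate.toList.any (fun c => c == '%' || c == ':' || c == '/') := by
    rw [pv_isIn_single, pv_isIn_single, pv_isIn_single]
    induction candidate.toList with
    | nil => rfl
    | cons c cs ih =>
      simp only [List.any_cons, ← ih]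
      cases c == '%' <;> cases c == ':' <;> cases c == '/' <;>
        cases cs.any (· == '%') <;> cases cs.any (· == ':') <;> cases cs.any (· == '/') <;> rfl
  rw [hq]
  exact pv_core (candidate.toList.filter (fun c => !(c == '-')))
    (candidate.toList.any (fun c => c == '%' || c == ':' || c == '/'))
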